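-- pv_equiv track=rewrite | github.com/pypi-data/pypi-mirror-400 | packages/driverlessai/driverlessai-2.3.1-py3-none-any.whl/driverlessai/_commons_mli.py | _list_to_phrase
-- ===== SOURCE A (Python) =====
-- from typing import List
-- from typing import Union
--
-- def _list_to_phrase(items: Union[List[int], List[float], List[str]]) -> str:
--     formatted_items: List[str]
--
--     if items and isinstance(items[0], str):
--         formatted_items = [f"'{i}'" for i in items]
--     else:
--         formatted_items = [f"{i}" for i in items]
--
--     if len(formatted_items) == 1:
--         return formatted_items[0]
--
--     if len(formatted_items) > 1:
--         formatted_items.insert(-1, "or")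
--         comma_separated = ", ".join(formatted_items)
--         return comma_separated.replace(", or,", " or")
--
--     return ""
-- ===== SOURCE B (Python) =====
-- from typing import List
-- from typing import Union
--
--
-- def _list_to_phrase(items: Union[List[int], List[float], List[str]]) -> str:
--     if items and isinstance(items[0], str):
--         formatted = [f"'{i}'" for i in items]
--     else:
--         formatted = [f"{i}" for i in items]
--
--     if not formatted:
--         return ""
--     if len(formatted) == 1:
--         return formatted[0]
--     return ", ".join(formatted[:-1]) + " or " + formatted[-1]
-- ===== Notes on version B (the rewrite author's own statement) =====
-- stated objective: simpler
-- what changed: Replaces A's insert('or' before the last element) + join + global string replace(', or,' -> ' or') sentinel trick with a direct construction: join all but the last formatted item and append ' or ' plus the last one.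
-- intended difference: On lists of length >= 2 in which some item itself contains the substring ', or,', A's global replace also mangles that item (e.g. ['a, or, b','c'] -> "'a or b' or 'c'"), while B returns the intended phrase "'a, or, b' or 'c'" that quotes each item verbatim. — e.g. on _list_to_phrase(["a, or, b", "c"]): A returns "'a or b' or 'c'", B returns "'a, or, b' or 'c'"
import Mathlib
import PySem

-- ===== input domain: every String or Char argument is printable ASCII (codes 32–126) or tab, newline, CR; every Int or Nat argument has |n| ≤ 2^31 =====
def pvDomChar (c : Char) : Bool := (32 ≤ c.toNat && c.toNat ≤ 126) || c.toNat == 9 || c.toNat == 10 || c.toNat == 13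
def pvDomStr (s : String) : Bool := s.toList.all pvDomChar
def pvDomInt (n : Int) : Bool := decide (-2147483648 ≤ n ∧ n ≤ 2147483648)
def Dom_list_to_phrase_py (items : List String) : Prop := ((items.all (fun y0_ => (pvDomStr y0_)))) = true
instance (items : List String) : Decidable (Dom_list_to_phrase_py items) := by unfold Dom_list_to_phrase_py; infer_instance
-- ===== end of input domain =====

-- B replaces A's insert-"or"-sentinel + join + global replace(", or," -> " or") trick by directly
-- joining all but the last formatted item and appending " or " plus the last one (simpler; where an
-- item itself contains ", or," A's global replace mangles it — see D_ below).

-- ===== PORT A =====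
def list_to_phrase_py (items : List String) : String :=
  -- 'isinstance(items[0], str)' is always true here: items : List String
  let formattedItems : List String :=
    if items.isEmpty = false then items.map (fun i => "'" ++ i ++ "'")
    else items.map (fun i => i)
  if formattedItems.length = 1 then
    (PySem.List.pyGet? formattedItems 0).getD ""   -- index 0 in range: length = 1
  else if formattedItems.length > 1 then
    let withOr := PySem.List.insert formattedItems (-1) "or"
    let commaSeparated := PySem.Str.join ", " withOr
    PySem.Str.replace commaSeparated ", or," " or"
  else ""

-- ===== PORT B =====
def list_to_phrase_py_alt (items : List String) : String :=
  let formatted : List String :=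
    if items.isEmpty = false then items.map (fun i => "'" ++ i ++ "'")
    else items.map (fun i => i)
  if formatted.isEmpty then ""
  else if formatted.length = 1 then
    (PySem.List.pyGet? formatted 0).getD ""        -- index 0 in range: length = 1
  else
    PySem.Str.join ", " (PySem.List.slice formatted none (some (-1))) ++ " or " ++
      (PySem.List.pyGet? formatted (-1)).getD ""   -- index -1 in range: list nonempty

-- ===== PRECONDITION & SPEC =====
-- On lists of length >= 2 in which some item itself contains the substring ", or,", A's global
-- replace also mangles that item (e.g. ['a, or, b','c'] -> "'a or b' or 'c'"), while B returns the
-- intended phrase "'a, or, b' or 'c'" quoting each item verbatim.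
def D_list_to_phrase_py (items : List String) : Prop :=
  2 ≤ items.length ∧ ∃ x ∈ items, PySem.Str.isIn ", or," x = true
instance (items : List String) : Decidable (D_list_to_phrase_py items) := by
  unfold D_list_to_phrase_py; infer_instance
def Spec_list_to_phrase_py (items : List String) (out : String) : Prop :=
  ¬ D_list_to_phrase_py items → out = list_to_phrase_py_alt items
instance (items : List String) (out : String) : Decidable (Spec_list_to_phrase_py items out) := by
  unfold Spec_list_to_phrase_py; infer_instance
def pvDiffWitness_list_to_phrase_py : List String := ["a, or, b", "c"]
def pvDiffWitnessOut_list_to_phrase_py : String × String := ("'a or b' or 'c'", "'a, or, b' or 'c'")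

-- ===== CLAIM (what is proved, stated in full; the proofs are below) =====
def Claim_unchanged_list_to_phrase_py : Prop := ∀ (items : List String), Dom_list_to_phrase_py items → Spec_list_to_phrase_py items (list_to_phrase_py items)
def Claim_changed_list_to_phrase_py : Prop := Dom_list_to_phrase_py (pvDiffWitness_list_to_phrase_py) ∧ D_list_to_phrase_py (pvDiffWitness_list_to_phrase_py) ∧ list_to_phrase_py (pvDiffWitness_list_to_phrase_py) = pvDiffWitnessOut_list_to_phrase_py.1 ∧ list_to_phrase_py_alt (pvDiffWitness_list_to_phrase_py) = pvDiffWitnessOut_list_to_phrase_py.2 ∧ pvDiffWitnessOut_list_to_phrase_py.1 ≠ pvDiffWitnessOut_list_to_phrase_py.2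

-- ===== LEMMAS AND PROOFS =====

-- the pattern ", or," and the replacement " or" as character lists
def pvP : List Char := [',', ' ', 'o', 'r', ',']
def pvOr : List Char := [' ', 'o', 'r']

-- structural model of CPython's left-to-right non-overlapping replace for this fixed pattern
def pvR : List Char → List Char
  | [] => []
  | c :: t => if pvP.isPrefixOf (c :: t) then pvOr ++ pvR (List.drop 4 t) else c :: pvR t
termination_by l => l.length
decreasing_by
  · simp [List.length_drop]
  · simp

theorem pv_go_eq (fuel : Nat) : ∀ (l acc : List Char), l.length ≤ fuel →
    PySem.Chars.replace.go pvP pvOr fuel l acc = acc.reverse ++ pvR l := by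
  induction fuel with
  | zero =>
    intro l acc h
    have hl : l = [] := by cases l <;> simp_all
    subst hl
    rw [PySem.Chars.replace.go]
    simp [pvR]
  | succ n ih =>
    intro l acc h
    cases l with
    | nil =>
      rw [PySem.Chars.replace.go]
      simp [pvR]
      omega
    | cons c t =>
      rw [PySem.Chars.replace.go]
      by_cases hp : pvP.isPrefixOf (c :: t) = true
      · rw [if_pos hp, pvR, if_pos hp]
        have hd : List.drop pvP.length (c :: t) = List.drop 4 t := by simp [pvP]
        rw [hd, ih _ _ (by simp at h ⊢; omega)]
        simp
      · rw [if_neg hp, pvR, if_neg hp]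
        rw [ih _ _ (by simp at h; omega)]
        simp

theorem pv_replace_eq (l : List Char) : PySem.Chars.replace l pvP pvOr = pvR l := by
  rw [PySem.Chars.replace, if_neg (by simp [pvP])]
  simpa using pv_go_eq l.length l [] le_rfl

theorem pvR_skip1 (c : Char) (t : List Char) (h : ¬ pvP <+: (c :: t)) :
    pvR (c :: t) = c :: pvR t := by
  rw [pvR, if_neg (by simpa [List.isPrefixOf_iff_prefix] using h)]

theorem pvR_match (t : List Char) : pvR (pvP ++ t) = pvOr ++ pvR t := by
  show pvR (',' :: ' ' :: 'o' :: 'r' :: ',' :: t) = _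
  rw [pvR, if_pos (by simp [pvP])]
  simp

theorem pv_prefix_append_short {p d b : List Char} (h : p <+: d ++ b)
    (hl : p.length ≤ d.length) : p <+: d :=
  List.prefix_of_prefix_length_le h (List.prefix_append d b) hl

theorem pv_mem_of_prefix_append_cons {b : List Char} {c : Char} :
    ∀ (d p : List Char), p <+: d ++ c :: b → d.length < p.length → c ∈ p := by
  intro d
  induction d with
  | nil =>
    intro p h hl
    cases p with
    | nil => simp at hl
    | cons a q =>
      rw [List.nil_append, List.cons_prefix_cons] at h
      simp [h.1]
  | cons e d ih =>
    intro p h hl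
    cases p with
    | nil => simp at hl
    | cons a q =>
      rw [List.cons_append, List.cons_prefix_cons] at h
      have := ih q h.2 (by simp at hl; omega)
      simp [this]

-- a quoted item as characters
def pvQ (x : List Char) : List Char := '\'' :: (x ++ ['\''])

-- no occurrence of the pattern starts inside a quoted pattern-free item
theorem pvK1 (x b : List Char) (hx : ¬ pvP <:+: x) :
    ∀ i < (pvQ x).length, ¬ pvP <+: ((pvQ x).drop i ++ b) := by
  intro i hi hpre
  cases i with
  | zero =>
    simp only [pvQ, List.drop_zero, List.cons_append] at hpre
    rw [show pvP = ',' :: [' ', 'o', 'r', ','] from rfl, List.cons_prefix_cons] at hpre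
    exact absurd hpre.1 (by decide)
  | succ j =>
    have hj : j ≤ x.length := by simp [pvQ] at hi; omega
    have hd : (pvQ x).drop (j + 1) = x.drop j ++ ['\''] := by
      simp [pvQ, List.drop_append_of_le_length hj]
    rw [hd, List.append_assoc] at hpre
    by_cases hlen : pvP.length ≤ (x.drop j).length
    · exact hx (((pv_prefix_append_short hpre hlen).isInfix).trans (x.drop_suffix j).isInfix)
    · have : '\'' ∈ pvP :=
        pv_mem_of_prefix_append_cons _ _ (by simpa using hpre)
          (by simp [pvP] at hlen ⊢; omega)
      exact absurd this (by decide)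

theorem pvR_append_skip (a b : List Char)
    (h : ∀ i < a.length, ¬ pvP <+: (a.drop i ++ b)) : pvR (a ++ b) = a ++ pvR b := by
  induction a with
  | nil => simp
  | cons c a ih =>
    rw [List.cons_append, pvR_skip1 _ _ (by simpa using h 0 (by simp))]
    rw [ih (fun i hi => by simpa using h (i + 1) (by simp; omega))]
    simp

theorem pvR_no_occ (s : List Char) (h : ∀ i < s.length, ¬ pvP <+: s.drop i) : pvR s = s := by
  have h2 := pvR_append_skip s [] (by intro i hi; simpa using h i hi)
  simpa [pvR] using h2

theorem pvR_quoted (x : List Char) (hx : ¬ pvP <:+: x) : pvR (pvQ x) = pvQ x :=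
  pvR_no_occ _ (fun i hi => by simpa using pvK1 x [] hx i hi)

theorem pv_inter_single (sep a : List Char) : List.intercalate sep [a] = a := by
  simp [List.intercalate, List.intersperse]

theorem pv_inter_cons_cons (sep a b : List Char) (l : List (List Char)) :
    List.intercalate sep (a :: b :: l) = a ++ sep ++ List.intercalate sep (b :: l) := by
  simp [List.intercalate, List.intersperse]

theorem pv_inter_concat2 (sep u v : List Char) : ∀ (l : List (List Char)), l ≠ [] →
    List.intercalate sep (l ++ [u, v]) =
      List.intercalate sep l ++ (sep ++ u ++ (sep ++ v)) := by
  intro l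
  induction l with
  | nil => intro h; exact absurd rfl h
  | cons a l ih =>
    intro _
    cases l with
    | nil =>
      rw [show ([a] ++ [u, v] : List (List Char)) = [a, u, v] from rfl,
        pv_inter_cons_cons, pv_inter_cons_cons, pv_inter_single, pv_inter_single]
      simp
    | cons b l' =>
      rw [show (a :: b :: l') ++ [u, v] = a :: ((b :: l') ++ [u, v]) from rfl,
        show ((b :: l') ++ [u, v] : List (List Char)) = b :: (l' ++ [u, v]) from rfl,
        pv_inter_cons_cons,
        show (b :: (l' ++ [u, v]) : List (List Char)) = (b :: l') ++ [u, v] from rfl,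
        ih (by simp), pv_inter_cons_cons]
      simp

-- the main computation: A's replace, run on the joined string with "or" inserted,
-- equals B's direct head-and-tail construction
theorem pv_main (xs : List (List Char)) (z : List Char) (hxs : xs ≠ [])
    (hall : ∀ x ∈ xs, ¬ pvP <:+: x) (hz : ¬ pvP <:+: z) :
    pvR (List.intercalate [',', ' '] (xs.map pvQ) ++ (pvP ++ (' ' :: pvQ z)))
      = List.intercalate [',', ' '] (xs.map pvQ) ++ (pvOr ++ (' ' :: pvQ z)) := by
  induction xs with
  | nil => exact absurd rfl hxs
  | cons x xs ih =>
    cases xs with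
    | nil =>
      simp only [List.map_cons, List.map_nil, pv_inter_single]
      rw [pvR_append_skip _ _ (pvK1 x _ (hall x (by simp)))]
      rw [pvR_match]
      rw [pvR_skip1 _ _ (by
        rw [show pvP = ',' :: [' ', 'o', 'r', ','] from rfl, List.cons_prefix_cons]
        intro hc; exact absurd hc.1 (by decide))]
      rw [pvR_quoted z hz]
    | cons y ys =>
      have hIhead : ∃ T, List.intercalate [',', ' '] (pvQ y :: List.map pvQ ys) = '\'' :: T := by
        cases ys with
        | nil => exact ⟨y ++ ['\''], by simp only [List.map_nil, pv_inter_single]; rfl⟩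
        | cons w ws =>
          refine ⟨(y ++ ['\'']) ++ ([',', ' '] ++
            List.intercalate [',', ' '] (pvQ w :: List.map pvQ ws)), ?_⟩
          rw [List.map_cons, pv_inter_cons_cons]
          simp [pvQ]
      obtain ⟨T, hT⟩ := hIhead
      simp only [List.map_cons]
      rw [pv_inter_cons_cons]
      have hstep : ∀ R : List Char,
          pvR (',' :: ' ' :: ('\'' :: T ++ R)) = ',' :: ' ' :: pvR ('\'' :: T ++ R) := by
        intro R
        rw [pvR_skip1 _ _ (by
          rw [show pvP = ',' :: ' ' :: ['o', 'r', ','] from rfl]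
          rw [List.cons_prefix_cons, List.cons_prefix_cons, List.cons_append,
            List.cons_prefix_cons]
          intro hc; exact absurd hc.2.2.1 (by decide))]
        rw [pvR_skip1 _ _ (by
          rw [show pvP = ',' :: [' ', 'o', 'r', ','] from rfl, List.cons_prefix_cons]
          intro hc; exact absurd hc.1 (by decide))]
      have ih2 := ih (by simp) (fun w hw => hall w (by simp [hw]))
      simp only [List.map_cons] at ih2
      rw [List.append_assoc, List.append_assoc]
      rw [pvR_append_skip _ _ (pvK1 x _ (hall x (by simp)))]
      rw [show ([',', ' '] : List Char) ++ (List.intercalate [',', ' '] (pvQ y :: List.map pvQ ys) ++ (pvP ++ (' ' :: pvQ z)))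
            = ',' :: ' ' :: ('\'' :: T ++ (pvP ++ (' ' :: pvQ z))) by rw [hT]; rfl]
      rw [hstep, ← hT, ih2]
      simp

theorem pv_quote_toList (s : String) : ("'" ++ s ++ "'").toList = pvQ s.toList := by
  rw [String.toList_append, String.toList_append]
  simp [pvQ, show "'".toList = ['\''] from rfl]

theorem pv_insert_neg_one (pre : List String) (lst v : String) :
    PySem.List.insert (pre ++ [lst]) (-1) v = pre ++ v :: [lst] := by
  simp only [PySem.List.insert, PySem.List.sliceIndices]
  norm_num

theorem pv_pyGet_last (pre : List String) (lst : String) :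
    PySem.List.pyGet? (pre ++ [lst]) (-1) = some lst := by
  simp [PySem.List.pyGet?, PySem.List.pyIdx?]

theorem pv_A_big (x0 : String) (xs : List String) (z : String) :
    list_to_phrase_py ((x0 :: xs) ++ [z]) =
      PySem.Str.replace
        (PySem.Str.join ", "
          (((x0 :: xs).map (fun i => "'" ++ i ++ "'")) ++ ["or", "'" ++ z ++ "'"]))
        ", or," " or" := by
  simp [list_to_phrase_py]
  rw [show ("'" ++ x0 ++ "'") :: (List.map (fun i => "'" ++ i ++ "'") xs ++ ["'" ++ z ++ "'"])
        = (("'" ++ x0 ++ "'") :: List.map (fun i => "'" ++ i ++ "'") xs) ++ ["'" ++ z ++ "'"]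
      from rfl]
  rw [pv_insert_neg_one]
  simp

theorem pv_B_big (x0 : String) (xs : List String) (z : String) :
    list_to_phrase_py_alt ((x0 :: xs) ++ [z]) =
      PySem.Str.join ", " ((x0 :: xs).map (fun i => "'" ++ i ++ "'")) ++ " or " ++
        ("'" ++ z ++ "'") := by
  simp [list_to_phrase_py_alt]
  rw [PySem.List.slice_to_neg_one]
  rw [show ("'" ++ x0 ++ "'") :: (List.map (fun i => "'" ++ i ++ "'") xs ++ ["'" ++ z ++ "'"])
        = (("'" ++ x0 ++ "'") :: List.map (fun i => "'" ++ i ++ "'") xs) ++ ["'" ++ z ++ "'"]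
      from rfl]
  rw [List.dropLast_concat, pv_pyGet_last]
  simp

-- ===== VERDICT (by name: the statement is the Claim_ definition above) =====
theorem list_to_phrase_py_spec : Claim_unchanged_list_to_phrase_py := by
  intro items _hdom hnd
  show list_to_phrase_py items = list_to_phrase_py_alt items
  cases items with
  | nil => rfl
  | cons a rest =>
    cases rest with
    | nil =>
      simp [list_to_phrase_py, list_to_phrase_py_alt]
    | cons b rest2 =>
      obtain ⟨xs, z, hconc⟩ : ∃ l' w, a :: b :: rest2 = l' ++ [w] := by
        rcases List.eq_nil_or_concat (a :: b :: rest2) with h | ⟨l', w, h⟩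
        · simp at h
        · exact ⟨l', w, by simpa [List.concat_eq_append] using h⟩
      have hlen2 : 2 ≤ (a :: b :: rest2).length := by simp
      rw [hconc] at hnd hlen2 ⊢
      cases xs with
      | nil => simp at hlen2
      | cons x0 xs' =>
      have hfree : ∀ x ∈ (x0 :: xs') ++ [z], ¬ pvP <:+: x.toList := by
        intro x hx hocc
        exact hnd ⟨hlen2, x, hx, (PySem.Str.isIn_iff_infix _ _).mpr hocc⟩
      rw [pv_A_big x0 xs' z, pv_B_big x0 xs' z]
      apply String.toList_inj.mp
      rw [PySem.Str.toList_replace,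
        show (", or," : String).toList = pvP from rfl,
        show (" or" : String).toList = pvOr from rfl,
        pv_replace_eq, PySem.Str.toList_join]
      rw [String.toList_append, String.toList_append, PySem.Str.toList_join]
      simp only [PySem.Chars.join, List.map_append, List.map_map,
        show (", " : String).toList = [',', ' '] from rfl]
      rw [show List.map (String.toList ∘ fun i => "'" ++ i ++ "'") (x0 :: xs')
            = List.map pvQ ((x0 :: xs').map String.toList) from by
          simp [Function.comp_def, pvQ]]
      rw [show List.map String.toList ["or", "'" ++ z ++ "'"]
            = [['o', 'r'], pvQ z.toList] from by
          rw [List.map_cons, List.map_singleton, pv_quote_toList]; rfl]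
      rw [pv_inter_concat2 _ _ _ _ (by simp)]
      have hmain := pv_main ((x0 :: xs').map String.toList) z.toList (by simp)
        (fun x hx => by
          obtain ⟨s, hs, rfl⟩ := List.mem_map.mp hx
          exact hfree s (by simp at hs ⊢; tauto))
        (hfree z (by simp))
      rw [List.append_assoc, List.append_assoc,
        show ['o', 'r'] ++ ([',', ' '] ++ pvQ z.toList)
          = 'o' :: 'r' :: ',' :: ' ' :: pvQ z.toList from rfl]
      rw [show [',', ' '] ++ ('o' :: 'r' :: ',' :: ' ' :: pvQ z.toList)
            = pvP ++ (' ' :: pvQ z.toList) from rfl]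
      rw [hmain]
      rw [show (" or " : String).toList = [' ', 'o', 'r', ' '] from rfl,
        pv_quote_toList]
      simp [pvOr]

theorem list_to_phrase_py_changed : Claim_changed_list_to_phrase_py := by
  unfold Claim_changed_list_to_phrase_py; decide
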